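-- pv_equiv track=rewrite | github.com/akekesi/morse | morse_func_00.py | func_morse2sign
-- ===== SOURCE A (Python) =====
-- def func_morse2sign(code: list) -> list:
-- 	"""
-- 	Convert morse code to sign
-- 	Args:
-- 		code: list of morse codes
-- 	Return:
-- 		list of signs
-- 	"""
-- 	sign = [0]
-- 	for c in " ".join(code):
-- 		if c == ".":
-- 			if sign[-1]:
-- 				sign.extend([0] * 1)
-- 			sign.extend([1] * 1)
-- 		if c == "-":
-- 			if sign[-1]:
-- 				sign.extend([0] * 1)
-- 			sign.extend([1] * 3)
-- 		if c == " ":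
-- 			sign.extend([0] * 3)
-- 		if c == "|":
-- 			sign.extend([0] * 7)
-- 	sign.extend([0] * 3)
-- 	return sign[1:]
-- ===== SOURCE B (Python) =====
-- TOKENS = {'.': [1], '-': [1, 1, 1], ' ': [0, 0, 0], '|': [0, 0, 0, 0, 0, 0, 0]}
-- MARKS = ('.', '-')
--
--
-- def func_morse2sign(code: list) -> list:
--     # stage 1: keep only the characters that carry signal meaning
--     kept = [c for c in " ".join(code) if c in TOKENS]
--     # stage 2: a separator 0 goes exactly between two consecutive kept marks;
--     # stage 3: flatten the table tokens
--     pieces = [([0] if p in MARKS and c in MARKS else []) + TOKENS[c]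
--               for p, c in zip([' '] + kept, kept)]
--     return [b for piece in pieces for b in piece] + [0, 0, 0]
-- ===== Notes on version B (the rewrite author's own statement) =====
-- stated objective: alternative
-- what changed: B replaces A's stateful single pass (sentinel list, if sign[-1] check, [1:] slice) by a stateless three-stage pipeline: filter the joined text to the four meaningful characters, decide each separator purely from the (previous kept char, current char) pair via a zip, look the tokens up in a table and flatten.
import Mathlib
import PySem

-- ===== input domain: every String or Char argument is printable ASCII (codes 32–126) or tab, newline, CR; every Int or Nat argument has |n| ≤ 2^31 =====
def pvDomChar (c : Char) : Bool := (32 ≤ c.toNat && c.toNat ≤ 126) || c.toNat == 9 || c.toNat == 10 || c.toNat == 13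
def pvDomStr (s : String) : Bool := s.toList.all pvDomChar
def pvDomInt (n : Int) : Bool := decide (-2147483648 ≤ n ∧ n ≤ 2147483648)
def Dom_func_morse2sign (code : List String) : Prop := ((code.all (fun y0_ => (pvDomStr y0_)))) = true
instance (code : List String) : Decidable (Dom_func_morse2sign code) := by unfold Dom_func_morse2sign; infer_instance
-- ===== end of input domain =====

-- B replaces A's stateful pass (sentinel, sign[-1] check, [1:] slice) by a stateless
-- filter → zip-with-previous → table-lookup-and-flatten pipeline; objective: alternative, same cost.

-- ===== PORT A =====
-- body of A's for-loop over " ".join(code); `if sign[-1]:` is truthiness of the last int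
-- (sign is never empty, so sign[-1] never raises; pyGetD with default 0 is exact here)
def pvStepA (sign : List Int) (c : Char) : List Int :=
  let sign := if c = '.' then
      (if PySem.List.pyGetD sign (-1) 0 ≠ 0 then sign ++ List.replicate 1 (0 : Int) else sign)
        ++ List.replicate 1 (1 : Int)
    else sign
  let sign := if c = '-' then
      (if PySem.List.pyGetD sign (-1) 0 ≠ 0 then sign ++ List.replicate 1 (0 : Int) else sign)
        ++ List.replicate 3 (1 : Int)
    else sign
  let sign := if c = ' ' then sign ++ List.replicate 3 (0 : Int) else sign
  let sign := if c = '|' then sign ++ List.replicate 7 (0 : Int) else sign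
  sign

def func_morse2sign (code : List String) : List Int :=
  let sign : List Int := [0]
  let sign := (PySem.Str.join " " code).toList.foldl pvStepA sign
  let sign := sign ++ List.replicate 3 (0 : Int)
  PySem.List.slice sign (some 1) none

-- ===== PORT B =====
-- Source B's TOKENS table (lookup by the four keys; 'c in TOKENS' = membership in the keys)
def pvTok (c : Char) : List Int :=
  if c = '.' then [1]
  else if c = '-' then [1, 1, 1]
  else if c = ' ' then [0, 0, 0]
  else [0, 0, 0, 0, 0, 0, 0]   -- '|' (kept chars are only these four)

def pvKeep (c : Char) : Bool := c = '.' || c = '-' || c = ' ' || c = '|'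

-- 'p in MARKS and c in MARKS'
def pvMark (c : Char) : Bool := c = '.' || c = '-'

def pvPiece (pc : Char × Char) : List Int :=
  (if pvMark pc.1 && pvMark pc.2 then [0] else []) ++ pvTok pc.2

def func_morse2sign_alt (code : List String) : List Int :=
  let kept := (PySem.Str.join " " code).toList.filter pvKeep
  let pieces := (List.zip (' ' :: kept) kept).map pvPiece
  pieces.flatten ++ [0, 0, 0]

-- ===== PRECONDITION & SPEC =====
def Spec_func_morse2sign (code : List String) (out : List Int) : Prop := out = func_morse2sign_alt code
instance (code : List String) (out : List Int) : Decidable (Spec_func_morse2sign code out) := by unfold Spec_func_morse2sign; infer_instance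

-- ===== CLAIM (what is proved, stated in full; the proofs are below) =====
def Claim_equal_func_morse2sign : Prop := ∀ (code : List String), Dom_func_morse2sign code → Spec_func_morse2sign code (func_morse2sign code)

-- ===== LEMMAS AND PROOFS =====

-- B's pairwise emission, in recursive form (zip with the previous kept char)
lemma pvZipMap_cons (f : Char × Char → List Int) (p k : Char) (ks : List Char) :
    ((List.zip (p :: k :: ks) (k :: ks)).map f).flatten
      = f (p, k) ++ ((List.zip (k :: ks) ks).map f).flatten := by
  simp [List.zip_cons_cons]

-- core invariant: A's fold from a non-empty accumulator whose last entry is truthy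
-- exactly when the previous kept char p is a mark, equals the accumulator plus
-- B's pairwise emission over the kept characters seeded with p
lemma pvInv (cs : List Char) : ∀ (s : List Int) (p : Char), s ≠ [] →
    (PySem.List.pyGetD s (-1) 0 ≠ 0 ↔ pvMark p = true) →
    List.foldl pvStepA s cs
      = s ++ ((List.zip (p :: cs.filter pvKeep) (cs.filter pvKeep)).map pvPiece).flatten := by
  induction cs with
  | nil => intro s p _ _; simp
  | cons c cs ih =>
    intro s p hne hlast
    by_cases hc : pvKeep c
    · -- c is one of the four kept chars: one piece is emitted
      have hfilter : (c :: cs).filter pvKeep = c :: cs.filter pvKeep := by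
        simp [hc]
      rw [List.foldl_cons, hfilter, pvZipMap_cons]
      by_cases h1 : c = '.'
      · subst h1
        by_cases hm : pvMark p = true
        · rw [show pvStepA s '.' = s ++ [0, 1] from by
            simp [pvStepA, hlast.mpr hm, List.replicate]]
          rw [ih _ '.' (by simp) (by
            rw [PySem.List.pyGetD_neg_one _ 0 (by simp)]; simp [pvMark])]
          have hm' : p = '.' ∨ p = '-' := by simpa [pvMark] using hm
          rcases hm' with h | h <;> subst h <;> simp [pvPiece, pvMark, pvTok]
        · have h0 : PySem.List.pyGetD s (-1) 0 = 0 := by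
            by_contra h; exact hm (hlast.mp h)
          rw [show pvStepA s '.' = s ++ [1] from by
            simp [pvStepA, h0, List.replicate]]
          rw [ih _ '.' (by simp) (by
            rw [PySem.List.pyGetD_neg_one _ 0 (by simp)]; simp [pvMark])]
          simp [pvMark] at hm
          simp [pvPiece, pvMark, pvTok, hm.1, hm.2]
      · by_cases h2 : c = '-'
        · subst h2
          by_cases hm : pvMark p = true
          · rw [show pvStepA s '-' = s ++ [0, 1, 1, 1] from by
              simp [pvStepA, hlast.mpr hm, List.replicate]]
            rw [ih _ '-' (by simp) (by
              rw [PySem.List.pyGetD_neg_one _ 0 (by simp)]; simp [pvMark])]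
            have hm' : p = '.' ∨ p = '-' := by simpa [pvMark] using hm
            rcases hm' with h | h <;> subst h <;> simp [pvPiece, pvMark, pvTok]
          · have h0 : PySem.List.pyGetD s (-1) 0 = 0 := by
              by_contra h; exact hm (hlast.mp h)
            rw [show pvStepA s '-' = s ++ [1, 1, 1] from by
              simp [pvStepA, h0, List.replicate]]
            rw [ih _ '-' (by simp) (by
              rw [PySem.List.pyGetD_neg_one _ 0 (by simp)]; simp [pvMark])]
            simp [pvMark] at hm
            simp [pvPiece, pvMark, pvTok, hm.1, hm.2]
        · by_cases h3 : c = ' '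
          · subst h3
            rw [show pvStepA s ' ' = s ++ [0, 0, 0] from by
              simp [pvStepA, List.replicate]]
            rw [ih _ ' ' (by simp) (by
              rw [PySem.List.pyGetD_neg_one _ 0 (by simp)]; simp [pvMark])]
            simp [pvPiece, pvMark, pvTok]
          · have h4 : c = '|' := by
              simp [pvKeep, h1, h2, h3] at hc; exact hc
            subst h4
            rw [show pvStepA s '|' = s ++ [0, 0, 0, 0, 0, 0, 0] from by
              simp [pvStepA, List.replicate]]
            rw [ih _ '|' (by simp) (by
              rw [PySem.List.pyGetD_neg_one _ 0 (by simp)]; simp [pvMark])]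
            simp [pvPiece, pvMark, pvTok]
    · -- c is ignored by both programs
      have hstep : pvStepA s c = s := by
        simp [pvKeep] at hc
        obtain ⟨⟨⟨n1, n2⟩, n3⟩, n4⟩ := hc
        simp [pvStepA, n1, n2, n3, n4]
      have hfilter : (c :: cs).filter pvKeep = cs.filter pvKeep := by
        simp [hc]
      rw [List.foldl_cons, hstep, hfilter]
      exact ih s p hne hlast

-- ===== VERDICT (by name: the statement is the Claim_ definition above) =====
theorem func_morse2sign_spec : Claim_equal_func_morse2sign := by
  intro code _
  show func_morse2sign code = func_morse2sign_alt code
  have h := pvInv (PySem.Str.join " " code).toList [0] ' ' (by simp) (by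
    rw [PySem.List.pyGetD_neg_one _ 0 (by simp)]
    simp [pvMark])
  simp only [PySem.Str.toList_join, show (" " : String).toList = [' '] from rfl] at h
  simp [func_morse2sign, func_morse2sign_alt, h, PySem.List.slice_from_one, List.replicate]
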